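-- pv_equiv track=rewrite | github.com/AshlynPowell/arctopsyche_population_scripts | pairwise_alignment_coords.py | get_indels
-- ===== SOURCE A (Python) =====
-- def get_indels(seq1, seq2):
-- 	"""
-- 	Description: Pull indels from pairwise alignment
-- 	Inputs: seq1 (string) - first sequence in the alignment
-- 			seq2 (string) - second sequence in the alignment
-- 	Return: table (list of lists of strings) - table of indel data with columns: allele (with insert), start position, indel length
-- 	"""
-- 	inGap = False
-- 	table = []
--
-- 	# Loop over each position in the alignment
-- 	for i in range(len(seq1)):
--
-- 		# Pull amino acid for given position in each seq
-- 		amino1 = seq1[i]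
-- 		amino2 = seq2[i]
--
-- 		if (amino1 == "-" or amino2 == "-") and inGap == False:
-- 			# This would be the start of a gap
--
-- 			inGap = True
-- 			row = []
--
-- 			# Add which allele has the insertion
-- 			if amino1 == "-":
-- 				allele = "2"
-- 				row.append(allele)
-- 			else:
-- 				allele = "1"
-- 				row.append(allele)
--
-- 			# Add the start position
-- 			start = i
-- 			row.append(str(i))
--
--
-- 		if amino1 != "-" and amino2 != "-" and inGap == True:
-- 			# This would be the end of a gap
--
-- 			inGap = False
--
-- 			# Pull the insertion from the sequence
-- 			if allele == "1":
-- 				insertion = seq1[start:i]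
-- 			else:
-- 				insertion = seq2[start:i]
--
-- 			# Add the length of the insertion
-- 			row.append(str(len(insertion)))
-- 			table.append(row)
--
-- 	return table
-- ===== SOURCE B (Python) =====
-- def get_indels(seq1, seq2):
--     n = len(seq1)
--     mask = [seq1[i] == "-" or seq2[i] == "-" for i in range(n)]
--     edges = list(zip([False] + mask, mask))
--     starts = [i for i, (p, m) in enumerate(edges) if m and not p]
--     ends = [i for i, (p, m) in enumerate(edges) if p and not m]
--     return [["2" if seq1[s] == "-" else "1", str(s), str(e - s)]
--             for s, e in zip(starts, ends)]
-- ===== Notes on version B (the rewrite author's own statement) =====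
-- stated objective: alternative
-- what changed: A's single stateful pass (inGap flag, partially built row, leftover allele/start variables) is replaced by a stateless pipeline: build the gap mask, read run starts and ends off edges of the mask (each position paired with its predecessor), and zip starts with ends so the unclosed trailing run drops out by truncation.
import Mathlib
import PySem

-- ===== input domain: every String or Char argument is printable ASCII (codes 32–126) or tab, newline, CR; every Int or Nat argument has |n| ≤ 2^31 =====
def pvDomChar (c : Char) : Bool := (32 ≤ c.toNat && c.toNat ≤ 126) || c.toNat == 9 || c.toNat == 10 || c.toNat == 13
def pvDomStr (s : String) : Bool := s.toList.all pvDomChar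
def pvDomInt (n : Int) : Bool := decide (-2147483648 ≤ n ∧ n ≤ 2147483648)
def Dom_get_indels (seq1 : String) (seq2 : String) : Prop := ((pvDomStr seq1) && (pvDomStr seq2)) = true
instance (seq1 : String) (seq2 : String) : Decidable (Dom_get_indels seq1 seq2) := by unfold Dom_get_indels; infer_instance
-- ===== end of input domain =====

-- B replaces A's stateful single pass by a stateless mask/edges/zip pipeline; objective: alternative decomposition, same cost. Equivalence is about the return value only.


-- ===== PORT A =====
-- A's loop body (the two sequential ifs; state = (inGap, table, row, allele, start))
def getIndelsStep (seq1 : String) (seq2 : String)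
    (st : Bool × List (List String) × List String × String × Int) (i : Int) :
    Bool × List (List String) × List String × String × Int :=
  let amino1 := (PySem.Str.pyGet? seq1 i).getD ' '
  let amino2 := (PySem.Str.pyGet? seq2 i).getD ' '
  let st1 :=
    if (amino1 == '-' || amino2 == '-') && !st.1 then
      if amino1 == '-' then (true, st.2.1, ["2", PySem.Int.toStr i], "2", i)
      else (true, st.2.1, ["1", PySem.Int.toStr i], "1", i)
    else st
  if amino1 != '-' && amino2 != '-' && st1.1 then
    let insertion := if st1.2.2.2.1 == "1" then PySem.Str.slice seq1 (some st1.2.2.2.2) (some i)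
      else PySem.Str.slice seq2 (some st1.2.2.2.2) (some i)
    (false, st1.2.1 ++ [st1.2.2.1 ++ [PySem.Int.toStr (PySem.Str.len insertion)]],
      st1.2.2.1, st1.2.2.2.1, st1.2.2.2.2)
  else st1

def get_indels (seq1 : String) (seq2 : String) : List (List String) :=
  ((PySem.List.pyRange 0 (PySem.Str.len seq1) 1).foldl (getIndelsStep seq1 seq2)
    (false, [], [], "", 0)).2.1

-- ===== PORT B =====
def get_indels_alt (seq1 : String) (seq2 : String) : List (List String) :=
  let n := PySem.Str.len seq1
  let mask : List Bool := (PySem.List.pyRange 0 n 1).map (fun i =>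
    ((PySem.Str.pyGet? seq1 i).getD ' ' == '-') || ((PySem.Str.pyGet? seq2 i).getD ' ' == '-'))
  let edges := (false :: mask).zip mask
  let starts := ((PySem.List.enumerate edges 0).filter (fun x => x.2.2 && !x.2.1)).map (·.1)
  let ends := ((PySem.List.enumerate edges 0).filter (fun x => x.2.1 && !x.2.2)).map (·.1)
  (starts.zip ends).map (fun se =>
    [if (PySem.Str.pyGet? seq1 se.1).getD ' ' == '-' then "2" else "1",
     PySem.Int.toStr se.1, PySem.Int.toStr (se.2 - se.1)])

-- ===== PRECONDITION & SPEC =====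
-- Pre_ excludes exactly the inputs where Python A raises IndexError: seq2 shorter than seq1 (A reads seq2[i] for every i < len(seq1)).
def Pre_get_indels (seq1 : String) (seq2 : String) : Prop := seq1.toList.length ≤ seq2.toList.length
instance (seq1 : String) (seq2 : String) : Decidable (Pre_get_indels seq1 seq2) := by unfold Pre_get_indels; infer_instance

def pvWitness_get_indels : String × String := ("a--b", "abcd")

def Spec_get_indels (seq1 : String) (seq2 : String) (out : List (List String)) : Prop := out = get_indels_alt seq1 seq2
instance (seq1 : String) (seq2 : String) (out : List (List String)) : Decidable (Spec_get_indels seq1 seq2 out) := by unfold Spec_get_indels; infer_instance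

-- ===== CLAIM (what is proved, stated in full; the proofs are below) =====
def Claim_equal_get_indels : Prop := ∀ (seq1 : String) (seq2 : String), Dom_get_indels seq1 seq2 → Pre_get_indels seq1 seq2 → Spec_get_indels seq1 seq2 (get_indels seq1 seq2)

-- ===== LEMMAS AND PROOFS =====

-- canonical list of closed gap runs of a mask, with a pending open-run start
def gScan : List Bool → Int → Option Int → List (Int × Int) × Option Int
  | [], _, pend => ([], pend)
  | true :: ms, i, none => gScan ms (i + 1) (some i)
  | true :: ms, i, some s => gScan ms (i + 1) (some s)
  | false :: ms, i, some s => let r := gScan ms (i + 1) none; ((s, i) :: r.1, r.2)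
  | false :: ms, i, none => gScan ms (i + 1) none

def gStarts : List Bool → Bool → Int → List Int
  | [], _, _ => []
  | m :: ms, p, i => (if m && !p then [i] else []) ++ gStarts ms m (i + 1)

def gEnds : List Bool → Bool → Int → List Int
  | [], _, _ => []
  | m :: ms, p, i => (if p && !m then [i] else []) ++ gEnds ms m (i + 1)

def pvMask (seq1 seq2 : String) : List Bool :=
  (PySem.List.pyRange 0 (PySem.Str.len seq1) 1).map (fun i =>
    ((PySem.Str.pyGet? seq1 i).getD ' ' == '-') || ((PySem.Str.pyGet? seq2 i).getD ' ' == '-'))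

def pvAllele (seq1 : String) (s : Int) : String :=
  if (PySem.Str.pyGet? seq1 s).getD ' ' == '-' then "2" else "1"

def pvRow (seq1 : String) (se : Int × Int) : List String :=
  [pvAllele seq1 se.1, PySem.Int.toStr se.1, PySem.Int.toStr (se.2 - se.1)]

theorem gStarts_filter (ms : List Bool) : ∀ (p : Bool) (i : Int),
    ((PySem.List.enumerate ((p :: ms).zip ms) i).filter (fun x => x.2.2 && !x.2.1)).map (·.1)
      = gStarts ms p i := by
  induction ms with
  | nil => intro p i; simp [gStarts, PySem.List.enumerate_nil]
  | cons m ms ih =>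
    intro p i
    simp only [List.zip_cons_cons, PySem.List.enumerate_cons, List.filter_cons, gStarts]
    by_cases h : (m && !p) = true <;> simp [h, ih]

theorem gEnds_filter (ms : List Bool) : ∀ (p : Bool) (i : Int),
    ((PySem.List.enumerate ((p :: ms).zip ms) i).filter (fun x => x.2.1 && !x.2.2)).map (·.1)
      = gEnds ms p i := by
  induction ms with
  | nil => intro p i; simp [gEnds, PySem.List.enumerate_nil]
  | cons m ms ih =>
    intro p i
    simp only [List.zip_cons_cons, PySem.List.enumerate_cons, List.filter_cons, gEnds]
    by_cases h : (p && !m) = true <;> simp [h, ih]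

theorem zip_gStarts_gEnds (ms : List Bool) : ∀ (i : Int) (pend : Option Int),
    (pend.toList ++ gStarts ms pend.isSome i).zip (gEnds ms pend.isSome i) = (gScan ms i pend).1 := by
  induction ms with
  | nil => intro i pend; cases pend <;> simp [gStarts, gEnds, gScan]
  | cons m ms ih =>
    intro i pend
    rcases m with _ | _ <;> rcases pend with _ | s
    · simpa [gStarts, gEnds, gScan] using ih (i + 1) none
    · simpa [gStarts, gEnds, gScan] using ih (i + 1) none
    · simpa [gStarts, gEnds, gScan] using ih (i + 1) (some i)
    · simpa [gStarts, gEnds, gScan] using ih (i + 1) (some s)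

theorem alt_eq_scan (seq1 seq2 : String) :
    get_indels_alt seq1 seq2 = (gScan (pvMask seq1 seq2) 0 none).1.map (pvRow seq1) := by
  have e : get_indels_alt seq1 seq2 =
      ((((PySem.List.enumerate ((false :: pvMask seq1 seq2).zip (pvMask seq1 seq2)) 0).filter
          (fun x => x.2.2 && !x.2.1)).map (·.1)).zip
       (((PySem.List.enumerate ((false :: pvMask seq1 seq2).zip (pvMask seq1 seq2)) 0).filter
          (fun x => x.2.1 && !x.2.2)).map (·.1))).map (pvRow seq1) := rfl
  rw [e, gStarts_filter, gEnds_filter]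
  have h := zip_gStarts_gEnds (pvMask seq1 seq2) 0 none
  simp only [Option.toList_none, Option.isSome_none, List.nil_append] at h
  rw [h]

theorem gScan_snoc (l : List Bool) (m : Bool) : ∀ (i : Int) (pend : Option Int),
    gScan (l ++ [m]) i pend =
      (match m, (gScan l i pend).2 with
       | true, none => ((gScan l i pend).1, some (i + l.length))
       | true, some s => ((gScan l i pend).1, some s)
       | false, some s => ((gScan l i pend).1 ++ [(s, i + l.length)], none)
       | false, none => ((gScan l i pend).1, none)) := by
  induction l with
  | nil =>
    intro i pend
    rcases m with _ | _ <;> rcases pend with _ | s <;> simp [gScan]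
  | cons b l ih =>
    intro i pend
    have harith : i + ((l.length + 1 : Nat) : Int) = (i + 1) + (l.length : Int) := by
      push_cast; ring
    rcases b with _ | _ <;> rcases pend with _ | s
    · simp only [List.cons_append, gScan, List.length_cons, ih]
      cases m <;> rcases h : (gScan l (i + 1) none).2 with _ | t <;> simp [h, harith] <;> try omega
    · simp only [List.cons_append, gScan, List.length_cons, ih]
      cases m <;> rcases h : (gScan l (i + 1) none).2 with _ | t <;> simp [h, harith] <;> try omega
    · simp only [List.cons_append, gScan, List.length_cons, ih]
      cases m <;> rcases h : (gScan l (i + 1) (some i)).2 with _ | t <;> simp [h, harith] <;> try omega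
    · simp only [List.cons_append, gScan, List.length_cons, ih]
      cases m <;> rcases h : (gScan l (i + 1) (some s)).2 with _ | t <;> simp [h, harith] <;> try omega

theorem a_invariant (seq1 seq2 : String) (hpre : Pre_get_indels seq1 seq2) (k : Nat)
    (hk : k ≤ seq1.toList.length) :
    ∃ row allele start,
      ((PySem.List.pyRange 0 (k : Int) 1).foldl (getIndelsStep seq1 seq2) (false, [], [], "", 0))
        = ((gScan ((pvMask seq1 seq2).take k) 0 none).2.isSome,
           (gScan ((pvMask seq1 seq2).take k) 0 none).1.map (pvRow seq1), row, allele, start) ∧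
      (∀ s, (gScan ((pvMask seq1 seq2).take k) 0 none).2 = some s →
        row = [pvAllele seq1 s, PySem.Int.toStr s] ∧ allele = pvAllele seq1 s ∧ start = s ∧
        0 ≤ s ∧ s < (k : Int)) := by
  induction k with
  | zero =>
    refine ⟨[], "", 0, ?_, ?_⟩
    · simp [PySem.List.pyRange_one_eq_nil, gScan]
    · simp [gScan]
  | succ k ih =>
    have hkn : k < seq1.toList.length := by omega
    obtain ⟨row, allele, start, heq, hpend⟩ := ih (by omega)
    have hk2 : k < seq2.toList.length := lt_of_lt_of_le hkn hpre
    have hr : PySem.List.pyRange 0 ((k + 1 : Nat) : Int) 1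
        = PySem.List.pyRange 0 (k : Int) 1 ++ [(k : Int)] := by
      push_cast
      exact PySem.List.pyRange_one_succ_right (by positivity)
    have hmk : (pvMask seq1 seq2)[k]? = some (((PySem.Str.pyGet? seq1 (k : Int)).getD ' ' == '-')
        || ((PySem.Str.pyGet? seq2 (k : Int)).getD ' ' == '-')) := by
      unfold pvMask
      rw [PySem.Str.len_eq]
      exact PySem.List.getElem?_map_pyRange_zero _ _ _ hkn
    have hlt : ((pvMask seq1 seq2).take k).length = k := by
      rw [List.length_take]
      have hml : (pvMask seq1 seq2).length = seq1.toList.length := by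
        simp [pvMask, PySem.Str.len_eq, PySem.List.length_pyRange_one]
      omega
    have htake : (pvMask seq1 seq2).take (k + 1)
        = (pvMask seq1 seq2).take k ++ [((PySem.Str.pyGet? seq1 (k : Int)).getD ' ' == '-')
            || ((PySem.Str.pyGet? seq2 (k : Int)).getD ' ' == '-')] := by
      rw [List.take_succ, hmk]
      simp
    have hg1 : PySem.Str.pyGet? seq1 (k : Int) = some (seq1.toList[k]'hkn) := by
      simp [PySem.Str.pyGet?_natCast, List.getElem?_eq_getElem, hkn]
    have hg2 : PySem.Str.pyGet? seq2 (k : Int) = some (seq2.toList[k]'hk2) := by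
      simp [PySem.Str.pyGet?_natCast, List.getElem?_eq_getElem, hk2]
    have hg1' : seq1.toList[k]? = some (seq1.toList[k]'hkn) := List.getElem?_eq_getElem hkn
    have hg2' : seq2.toList[k]? = some (seq2.toList[k]'hk2) := List.getElem?_eq_getElem hk2
    have hsnoc := gScan_snoc ((pvMask seq1 seq2).take k)
      (((PySem.Str.pyGet? seq1 (k : Int)).getD ' ' == '-')
        || ((PySem.Str.pyGet? seq2 (k : Int)).getD ' ' == '-')) 0 none
    rw [hlt] at hsnoc
    rw [hr, List.foldl_append, heq, htake, hsnoc]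
    rcases hp : (gScan ((pvMask seq1 seq2).take k) 0 none).2 with _ | s
    · -- no pending gap before position k
      by_cases h1 : seq1.toList[k]'hkn = '-'
      · refine ⟨["2", PySem.Int.toStr (k : Int)], "2", (k : Int), ?_, ?_⟩
        · simp [getIndelsStep, hg1, hg2, hg1', hg2', h1, hp]
        · intro s hs
          simp [hg1, hg2, hg1', hg2', h1, hp] at hs
          subst hs
          refine ⟨by simp [pvAllele, hg1, hg1', h1], by simp [pvAllele, hg1, hg1', h1], rfl, by positivity, by push_cast; omega⟩
      · by_cases h2 : seq2.toList[k]'hk2 = '-'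
        · refine ⟨["1", PySem.Int.toStr (k : Int)], "1", (k : Int), ?_, ?_⟩
          · simp [getIndelsStep, hg1, hg2, hg1', hg2', h1, h2, hp]
          · intro s hs
            simp [hg1, hg2, hg1', hg2', h1, h2, hp] at hs
            subst hs
            refine ⟨by simp [pvAllele, hg1, hg1', h1], by simp [pvAllele, hg1, hg1', h1], rfl, by positivity, by push_cast; omega⟩
        · have hbm : (seq1.toList[k]'hkn == '-' || seq2.toList[k]'hk2 == '-') = false := by
            simp [h1, h2]
          refine ⟨row, allele, start, ?_, ?_⟩
          · simp [getIndelsStep, hg1, hg2, hg1', hg2', h1, h2, hbm, hp]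
          · intro s hs
            simp [hg1, hg2, hg1', hg2', h1, h2, hbm, hp] at hs
    · -- a gap is pending, started at s
      obtain ⟨hrow, hallele, hstart, hs0, hsk⟩ := hpend s hp
      by_cases h1 : seq1.toList[k]'hkn = '-'
      · refine ⟨row, allele, start, ?_, ?_⟩
        · simp [getIndelsStep, hg1, hg2, hg1', hg2', h1, hp]
        · intro t ht
          simp [hg1, hg2, hg1', hg2', h1, hp] at ht
          subst ht
          exact ⟨hrow, hallele, hstart, hs0, by push_cast; omega⟩
      · by_cases h2 : seq2.toList[k]'hk2 = '-'
        · refine ⟨row, allele, start, ?_, ?_⟩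
          · simp [getIndelsStep, hg1, hg2, hg1', hg2', h1, h2, hp]
          · intro t ht
            simp [hg1, hg2, hg1', hg2', h1, h2, hp] at ht
            subst ht
            exact ⟨hrow, hallele, hstart, hs0, by push_cast; omega⟩
        · -- gap closes at k
          have hL : ∀ cs : List Char, (k : Nat) ≤ cs.length →
              ((PySem.List.slice cs (some s) (some (k : Int))).length : Int) = (k : Int) - s := by
            intro cs hcl
            rw [PySem.List.slice_toNat cs hs0 (by positivity)]
            simp only [List.length_take, List.length_drop]
            omega
          have hL1 : ((PySem.List.slice seq1.toList (some s) (some (k : Int))).length : Int)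
              = (k : Int) - s := hL _ (le_of_lt hkn)
          have hL2 : ((PySem.List.slice seq2.toList (some s) (some (k : Int))).length : Int)
              = (k : Int) - s := hL _ (le_of_lt hk2)
          have hL1' : PySem.Str.len (PySem.Str.slice seq1 (some s) (some (k : Int)))
              = (k : Int) - s := by
            rw [PySem.Str.len_eq, PySem.Str.toList_slice]; exact hL1
          have hL2' : PySem.Str.len (PySem.Str.slice seq2 (some s) (some (k : Int)))
              = (k : Int) - s := by
            rw [PySem.Str.len_eq, PySem.Str.toList_slice]; exact hL2
          have hbm : (seq1.toList[k]'hkn == '-' || seq2.toList[k]'hk2 == '-') = false := by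
            simp [h1, h2]
          refine ⟨row, allele, start, ?_, ?_⟩
          · subst hallele hstart hrow
            have hS1 : (((PySem.Str.slice seq1 (some start) (some (k : Int))).length : Nat) : Int)
                = (k : Int) - start := by
              rw [← String.length_toList, PySem.Str.toList_slice]; exact hL1
            have hS2 : (((PySem.Str.slice seq2 (some start) (some (k : Int))).length : Nat) : Int)
                = (k : Int) - start := by
              rw [← String.length_toList, PySem.Str.toList_slice]; exact hL2
            by_cases hcs : (PySem.List.pyGet? seq1.toList start).getD ' ' = '-'
            · simp [getIndelsStep, hg1, hg2, hg1', hg2', h1, h2, hbm, hp, pvAllele, pvRow, hcs,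
                hS1, hS2, hL1, hL2, hL1', hL2']
            · simp [getIndelsStep, hg1, hg2, hg1', hg2', h1, h2, hbm, hp, pvAllele, pvRow, hcs,
                hS1, hS2, hL1, hL2, hL1', hL2']
          · intro t ht
            simp [hg1, hg2, hg1', hg2', h1, h2, hbm, hp] at ht

-- ===== VERDICT (by name: the statement is the Claim_ definition above) =====
theorem get_indels_spec : Claim_equal_get_indels := by
  intro seq1 seq2 _hdom hpre
  unfold Spec_get_indels
  have hm : (pvMask seq1 seq2).take seq1.toList.length = pvMask seq1 seq2 := by
    have hl : (pvMask seq1 seq2).length = seq1.toList.length := by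
      simp [pvMask, PySem.List.length_pyRange_one, PySem.Str.len_eq]
    rw [← hl, List.take_length]
  obtain ⟨row, allele, start, heq, _⟩ :=
    a_invariant seq1 seq2 hpre seq1.toList.length (le_refl _)
  rw [alt_eq_scan]
  unfold get_indels
  rw [PySem.Str.len_eq, heq, hm]
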